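-- pv_equiv track=rewrite | github.com/xiashiwendao/leecode | leecode/269_alien-dictionary.py | alien_dic
-- ===== SOURCE A (Python) =====
-- def alien_dic(words):
--     order_list=[]
--     order_sub_list=[]
--     max_len = 0
--     for word in words:
--         index = 0
--         for ch in word:
--             # 每个字母位置都设置一下appendlist，如果没有则创建，如果有可以直接取用
--             if len(order_sub_list) < index+1:
--                 order_sub_list.append([])
--             tmp_lst = order_sub_list[index]
--             # 这一步可以优化，不需要每次都遍历一遍
--             if ch not in tmp_lst:
--                 tmp_lst.append(ch)
--
--             index+=1
--
--     return order_sub_list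
-- ===== SOURCE B (Python) =====
-- def alien_dic(words):
--     width = max((len(w) for w in words), default=0)
--     return [list(dict.fromkeys(w[i] for w in words if i < len(w)))
--             for i in range(width)]
-- ===== Notes on version B (the rewrite author's own statement) =====
-- stated objective: idiomatic
-- what changed: B transposes the words column by column (one comprehension per column index up to the max word length) and deduplicates each column with dict.fromkeys, instead of A's row-wise scan that incrementally grows per-position lists with a membership test.
import Mathlib
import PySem

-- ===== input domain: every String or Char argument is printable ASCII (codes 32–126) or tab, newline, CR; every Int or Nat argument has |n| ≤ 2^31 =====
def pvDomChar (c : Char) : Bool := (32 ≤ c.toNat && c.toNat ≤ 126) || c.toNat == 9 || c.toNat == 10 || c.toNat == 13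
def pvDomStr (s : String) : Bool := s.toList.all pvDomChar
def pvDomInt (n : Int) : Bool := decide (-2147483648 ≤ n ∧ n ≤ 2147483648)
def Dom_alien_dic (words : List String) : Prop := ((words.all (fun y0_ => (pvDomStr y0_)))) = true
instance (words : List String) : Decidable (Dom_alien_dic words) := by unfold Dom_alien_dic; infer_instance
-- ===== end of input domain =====

-- B collects the same per-column distinct characters by transposing the words (one pass per
-- column index up to the max word length, dedup per column) instead of A's row-wise
-- incremental growth of the column lists; objective: more idiomatic, same results.

-- ===== PORT A =====
-- inner 'for ch in word' loop of A: state = order_sub_list, running index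
def alienProcWord (cs : List Char) (s : List (List String)) (i : Nat) : List (List String) :=
  match cs with
  | [] => s
  | c :: rest =>
    -- if len(order_sub_list) < index+1: order_sub_list.append([])
    let s1 := if s.length < i + 1 then s ++ [[]] else s
    -- tmp_lst = order_sub_list[index]
    let tmp := s1.getD i []
    -- if ch not in tmp_lst: tmp_lst.append(ch)   (in-place: update slot i)
    let s2 := if String.singleton c ∈ tmp then s1 else s1.set i (tmp ++ [String.singleton c])
    alienProcWord rest s2 (i + 1)

def alien_dic (words : List String) : List (List String) :=
  words.foldl (fun s w => alienProcWord w.toList s 0) []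

-- ===== PORT B =====
-- list(dict.fromkeys(...)): insert keys left to right, skipping ones already present
def alienDedup (l : List String) : List String :=
  l.foldl (fun acc c => if c ∈ acc then acc else acc ++ [c]) []

-- the column at index i: w[i] for w in words if i < len(w)
def alienCol (words : List String) (i : Nat) : List String :=
  words.filterMap (fun w => (w.toList[i]?).map (fun c => String.singleton c))

def alien_dic_alt (words : List String) : List (List String) :=
  let width := words.foldl (fun m w => max m w.toList.length) 0
  (List.range width).map (fun i => alienDedup (alienCol words i))

-- ===== PRECONDITION & SPEC =====
def Spec_alien_dic (words : List String) (out : List (List String)) : Prop := out = alien_dic_alt words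
instance (words : List String) (out : List (List String)) : Decidable (Spec_alien_dic words out) := by unfold Spec_alien_dic; infer_instance

-- ===== CLAIM (what is proved, stated in full; the proofs are below) =====
def Claim_equal_alien_dic : Prop := ∀ (words : List String), Dom_alien_dic words → Spec_alien_dic words (alien_dic words)

-- ===== LEMMAS AND PROOFS =====

def alienIns (l : List String) (c : String) : List String :=
  if c ∈ l then l else l ++ [c]

def alienWidth (words : List String) : Nat :=
  words.foldl (fun m w => max m w.toList.length) 0

theorem foldl_max_ge (l : List String) (a : Nat) :
    a ≤ l.foldl (fun m w => max m w.toList.length) a := by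
  induction l generalizing a with
  | nil => simp
  | cons w t ih => exact le_trans (le_max_left _ _) (ih _)

theorem len_le_foldl (l : List String) (w : String) (hw : w ∈ l) (a : Nat) :
    w.toList.length ≤ l.foldl (fun m v => max m v.toList.length) a := by
  induction l generalizing a with
  | nil => cases hw
  | cons x t ih =>
    rcases List.mem_cons.1 hw with h | h
    · subst h
      exact le_trans (le_max_right _ _) (foldl_max_ge t _)
    · exact ih h _

theorem len_le_width (words : List String) (w : String) (hw : w ∈ words) :
    w.toList.length ≤ alienWidth words := len_le_foldl words w hw 0

theorem col_nil_of_wide (words : List String) (i : Nat) (h : alienWidth words ≤ i) :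
    alienCol words i = [] := by
  unfold alienCol
  rw [List.filterMap_eq_nil_iff]
  intro w hw
  have : (w.toList)[i]? = none := by
    rw [List.getElem?_eq_none_iff]
    exact le_trans (len_le_width words w hw) h
  simp [this]

theorem alt_length (words : List String) :
    (alien_dic_alt words).length = alienWidth words := by
  simp [alien_dic_alt, alienWidth]

theorem alt_getD (words : List String) (i : Nat) :
    (alien_dic_alt words).getD i [] = alienDedup (alienCol words i) := by
  by_cases h : i < alienWidth words
  · unfold alien_dic_alt
    rw [List.getD_eq_getElem _ _ (by simpa [alienWidth] using h)]
    simp [alienWidth] at h ⊢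
  · rw [List.getD_eq_default _ _ (by simpa [alt_length] using not_lt.1 h)]
    rw [col_nil_of_wide words i (not_lt.1 h)]
    rfl

theorem dedup_append_one (l : List String) (c : String) :
    alienDedup (l ++ [c]) = alienIns (alienDedup l) c := by
  simp [alienDedup, alienIns, List.foldl_append]

theorem width_append (ws : List String) (w : String) :
    alienWidth (ws ++ [w]) = max (alienWidth ws) w.toList.length := by
  simp [alienWidth, List.foldl_append]

theorem col_append (ws : List String) (w : String) (i : Nat) :
    alienCol (ws ++ [w]) i =
      alienCol ws i ++ (if h : i < w.toList.length
        then [String.singleton (w.toList.getD i ' ')] else []) := by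
  unfold alienCol
  rw [List.filterMap_append]
  congr 1
  by_cases h : i < w.toList.length
  · rw [dif_pos h, List.getD_eq_getElem _ _ h]
    simp [List.getElem?_eq_getElem h]
  · rw [dif_neg h]
    have : (w.toList)[i]? = none := by
      rw [List.getElem?_eq_none_iff]; omega
    simp [this]

theorem proc_length (cs : List Char) (s : List (List String)) (i : Nat) (hi : i ≤ s.length) :
    (alienProcWord cs s i).length = max s.length (i + cs.length) := by
  induction cs generalizing s i with
  | nil => simp [alienProcWord]; omega
  | cons c rest ih =>
    unfold alienProcWord
    by_cases h1 : s.length < i + 1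
    · simp only [h1, if_true]
      by_cases h2 : String.singleton c ∈ (s ++ [[]]).getD i []
      · rw [if_pos h2, ih _ _ (by simp; omega)]
        simp only [List.length_append, List.length_cons, List.length_nil]
        omega
      · rw [if_neg h2, ih _ _ (by simp; omega)]
        simp only [List.length_set, List.length_append, List.length_cons, List.length_nil]
        omega
    · simp only [h1, if_false]
      by_cases h2 : String.singleton c ∈ s.getD i []
      · rw [if_pos h2, ih _ _ (by omega)]
        simp only [List.length_cons]
        omega
      · rw [if_neg h2, ih _ _ (by simp; omega)]
        simp only [List.length_set, List.length_cons]
        omega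

theorem getD_set_ne {α : Type} (l : List α) (i j : Nat) (a d : α) (h : i ≠ j) :
    (l.set i a).getD j d = l.getD j d := by
  simp [List.getD, List.getElem?_set_ne h]

theorem getD_append_one (s : List (List String)) (j : Nat) (hj : j ≠ s.length) :
    (s ++ [([] : List String)]).getD j [] = s.getD j [] := by
  by_cases h : j < s.length
  · simp [List.getD, List.getElem?_append_left h]
  · have h1 : s.length < j := by omega
    rw [List.getD_eq_default _ _ (by simp; omega), List.getD_eq_default _ _ (by omega)]

theorem proc_getD (cs : List Char) (s : List (List String)) (i : Nat) (hi : i ≤ s.length)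
    (j : Nat) :
    (alienProcWord cs s i).getD j [] =
      if i ≤ j ∧ j - i < cs.length
      then alienIns (s.getD j []) (String.singleton (cs.getD (j - i) ' '))
      else s.getD j [] := by
  induction cs generalizing s i with
  | nil => simp [alienProcWord]
  | cons c rest ih =>
    unfold alienProcWord
    simp only []
    -- facts about s1
    set s1 := if s.length < i + 1 then s ++ [[]] else s with hs1
    have hs1len : i + 1 ≤ s1.length := by
      rw [hs1]; split <;> simp <;> omega
    have hs1get : ∀ k, k ≠ s.length → s1.getD k [] = s.getD k [] := by
      intro k hk
      rw [hs1]; split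
      · exact getD_append_one s k hk
      · rfl
    have hs1geti : s1.getD i [] = s.getD i [] := by
      by_cases hsl : i = s.length
      · rw [hs1]
        split
        · subst hsl
          rw [List.getD_eq_getElem _ _ (by simp)]
          simp
        · omega
      · exact hs1get i hsl
    set tmp := s1.getD i [] with htmp
    set s2 := if String.singleton c ∈ tmp then s1 else s1.set i (tmp ++ [String.singleton c]) with hs2
    have hs2len : i + 1 ≤ s2.length := by
      rw [hs2]; split
      · exact hs1len
      · simpa using hs1len
    have hs2geti : s2.getD i [] = alienIns (s.getD i []) (String.singleton c) := by
      rw [hs2, alienIns, ← hs1geti]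
      by_cases hc : String.singleton c ∈ tmp
      · rw [if_pos hc, if_pos hc]
      · rw [if_neg hc, if_neg hc]
        rw [List.getD_eq_getElem _ _ (by rw [List.length_set]; omega)]
        exact List.getElem_set_self (by simp only [List.length_set]; omega)
    have hs2getne : ∀ k, k ≠ i → s2.getD k [] = s.getD k [] := by
      intro k hk
      have hks : s2.getD k [] = s1.getD k [] := by
        rw [hs2]; split
        · rfl
        · exact getD_set_ne _ _ _ _ _ (Ne.symm hk)
      rw [hks]
      by_cases hkl : k = s.length
      · subst hkl
        by_cases hb : s.length < i + 1
        · omega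
        · rw [hs1, if_neg hb]
      · exact hs1get k hkl
    rw [ih s2 (i + 1) hs2len]
    by_cases hji : j = i
    · have hn : ¬ (i + 1 ≤ j ∧ j - (i + 1) < rest.length) := by omega
      rw [if_neg hn, if_pos (show i ≤ j ∧ j - i < (c :: rest).length by simp; omega)]
      have hj0 : j - i = 0 := by omega
      rw [hj0, hji, hs2geti]
      simp
    · by_cases hc : i ≤ j ∧ j - i < rest.length + 1
      · have hc' : i + 1 ≤ j ∧ j - (i + 1) < rest.length := by omega
        rw [if_pos hc', if_pos (show i ≤ j ∧ j - i < (c :: rest).length by simp; omega),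
          hs2getne j hji]
        have hji1 : j - i = (j - (i + 1)) + 1 := by omega
        rw [hji1]
        simp
      · have hc' : ¬ (i + 1 ≤ j ∧ j - (i + 1) < rest.length) := by omega
        rw [if_neg hc', if_neg (show ¬ (i ≤ j ∧ j - i < (c :: rest).length) by simp; omega),
          hs2getne j hji]

theorem eq_of_getD {α : Type} (l1 l2 : List α) (d : α) (hl : l1.length = l2.length)
    (h : ∀ j, l1.getD j d = l2.getD j d) : l1 = l2 := by
  apply List.ext_getElem hl
  intro j h1 h2
  have := h j
  rwa [List.getD_eq_getElem _ _ h1, List.getD_eq_getElem _ _ h2] at this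

theorem main_step (ws : List String) (w : String)
    (ih : alien_dic ws = alien_dic_alt ws) :
    alien_dic (ws ++ [w]) = alien_dic_alt (ws ++ [w]) := by
  have hA : alien_dic (ws ++ [w]) = alienProcWord w.toList (alien_dic ws) 0 := by
    simp [alien_dic, List.foldl_append]
  rw [hA, ih]
  apply eq_of_getD _ _ []
  · rw [proc_length _ _ _ (by omega), alt_length, alt_length, width_append]
    omega
  · intro j
    rw [proc_getD _ _ _ (by omega) j, alt_getD, alt_getD, col_append]
    by_cases h : j < w.toList.length
    · rw [if_pos ⟨by omega, by omega⟩, dif_pos h, dedup_append_one]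
      simp
    · rw [if_neg (by omega), dif_neg h]
      simp

theorem alien_main (words : List String) : alien_dic words = alien_dic_alt words := by
  induction words using List.reverseRecOn with
  | nil => rfl
  | append_singleton ws w ih => exact main_step ws w ih

-- ===== VERDICT (by name: the statement is the Claim_ definition above) =====
theorem alien_dic_spec : Claim_equal_alien_dic := by
  intro words _
  exact alien_main words
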